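-- pv_equiv track=rewrite | github.com/saharthejamal/Proj_2 | apriori_2636123.py | remove_non_maximal_itemsets
-- ===== SOURCE A (Python) =====
-- def remove_non_maximal_itemsets(frequent_itemsets):
--     maximal_itemsets = []
--
--     for itemset in frequent_itemsets:
--         is_subset = False
--
--         for other_itemset in frequent_itemsets:
--             if itemset != other_itemset and itemset.issubset(other_itemset):
--                 is_subset = True
--                 break
--
--         if not is_subset:
--             maximal_itemsets.append(itemset)
--
--     maximal_itemsets.sort(key=lambda x: (len(x), sorted(list(x))))
--
--     return maximal_itemsets
-- ===== SOURCE B (Python) =====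
-- def remove_non_maximal_itemsets(frequent_itemsets):
--     # Sort first by the final key; any proper superset is strictly longer and so
--     # appears strictly later, hence each set need only be checked against its suffix.
--     ordered = sorted(frequent_itemsets, key=lambda x: (len(x), sorted(list(x))))
--     result = []
--     for i, s in enumerate(ordered):
--         if not any(s != t and s.issubset(t) for t in ordered[i + 1:]):
--             result.append(s)
--     return result
-- ===== Notes on version B (the rewrite author's own statement) =====
-- stated objective: alternative
-- what changed: B sorts the input by the final (len, sorted elements) key FIRST and then makes one forward pass that checks each itemset only against its suffix (every proper superset is strictly longer so it appears strictly later), instead of A's scan of the whole input per itemset followed by a final sort; Pre_ excludes inputs whose Lean encoding contains two distinct duplicate-free list encodings of the same set value (and invalid encodings with duplicate elements), because there the final stable sort's tie order between equal-valued itemsets is an accident of set-iteration-order encoding.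
import Mathlib
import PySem

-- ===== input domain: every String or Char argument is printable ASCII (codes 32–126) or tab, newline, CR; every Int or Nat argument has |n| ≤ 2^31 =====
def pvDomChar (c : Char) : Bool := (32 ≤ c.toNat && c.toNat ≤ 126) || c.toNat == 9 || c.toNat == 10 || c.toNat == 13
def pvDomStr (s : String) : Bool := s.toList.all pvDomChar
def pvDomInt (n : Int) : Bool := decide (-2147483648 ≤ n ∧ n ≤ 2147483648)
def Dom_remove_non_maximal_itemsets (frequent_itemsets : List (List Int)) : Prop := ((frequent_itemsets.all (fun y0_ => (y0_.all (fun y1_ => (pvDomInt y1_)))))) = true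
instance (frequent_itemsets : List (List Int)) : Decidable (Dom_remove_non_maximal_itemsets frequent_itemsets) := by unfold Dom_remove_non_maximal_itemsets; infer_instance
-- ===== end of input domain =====

-- B sorts the input by the final (len, sorted elements) key FIRST and then filters each itemset against
-- its suffix only (a proper superset is strictly longer, so strictly later), instead of A's whole-input
-- scan per itemset followed by a final sort (alternative decomposition, same worst-case cost).
-- Itemsets (Python sets) are encoded as duplicate-free lists of their elements.

-- ===== PORT A =====
-- shared primitives on the set-as-list encoding (used verbatim by both Pythons):
-- itemset.issubset(other)
def pySubset (a b : List Int) : Bool := a.all (fun x => b.contains x)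
-- itemset == other (set equality by value; Python's != on sets is its negation)
def pySetEq (a b : List Int) : Bool := pySubset a b && pySubset b a
-- len(x) on a set (encodings are duplicate-free)
def pyLen (s : List Int) : Int := (s.length : Int)
-- sorted(list(x))
def pyKey2 (s : List Int) : List Int := PySem.List.sorted s (fun x => x) false

def remove_non_maximal_itemsets (frequent_itemsets : List (List Int)) : List (List Int) :=
  -- for itemset in frequent_itemsets: scan the WHOLE input for a proper superset (break = any)
  let maximal_itemsets := frequent_itemsets.foldl (fun acc itemset =>
    if frequent_itemsets.any (fun other => !pySetEq itemset other && pySubset itemset other)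
    then acc
    else acc ++ [itemset]) []
  -- maximal_itemsets.sort(key=lambda x: (len(x), sorted(list(x))))
  PySem.List.sorted2 maximal_itemsets pyLen pyKey2 false

-- ===== PORT B =====
-- the indexed loop 'for i, s in enumerate(ordered): … any(… for t in ordered[i+1:])' as the obvious
-- structural recursion: at each position the remaining tail IS ordered[i+1:]
def altSuffixScan : List (List Int) → List (List Int)
  | [] => []
  | s :: rest =>
      if rest.any (fun t => !pySetEq s t && pySubset s t)
      then altSuffixScan rest
      else s :: altSuffixScan rest

def remove_non_maximal_itemsets_alt (frequent_itemsets : List (List Int)) : List (List Int) :=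
  -- ordered = sorted(frequent_itemsets, key=lambda x: (len(x), sorted(list(x))))
  altSuffixScan (PySem.List.sorted2 frequent_itemsets pyLen pyKey2 false)

-- ===== PRECONDITION & SPEC =====
-- Pre_ restricts to valid encodings of a Python list of sets: inner lists are duplicate-free, and no two
-- DISTINCT list encodings of the SAME set value occur — on such inputs the relative order of equal-valued
-- itemsets under the final stable sort is a tie decided by the accidental set-iteration-order encoding.
def Pre_remove_non_maximal_itemsets (frequent_itemsets : List (List Int)) : Prop :=
  (∀ l ∈ frequent_itemsets, l.Nodup) ∧
  ∀ a ∈ frequent_itemsets, ∀ b ∈ frequent_itemsets, pySetEq a b = true → a = b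
instance (frequent_itemsets : List (List Int)) : Decidable (Pre_remove_non_maximal_itemsets frequent_itemsets) := by unfold Pre_remove_non_maximal_itemsets; infer_instance
def pvWitness_remove_non_maximal_itemsets : List (List Int) := [[1, 2], [1], [2, 3], [2]]

def Spec_remove_non_maximal_itemsets (frequent_itemsets : List (List Int)) (out : List (List Int)) : Prop := out = remove_non_maximal_itemsets_alt frequent_itemsets
instance (frequent_itemsets : List (List Int)) (out : List (List Int)) : Decidable (Spec_remove_non_maximal_itemsets frequent_itemsets out) := by unfold Spec_remove_non_maximal_itemsets; infer_instance

-- ===== CLAIM (what is proved, stated in full; the proofs are below) =====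
def Claim_equal_remove_non_maximal_itemsets : Prop := ∀ (frequent_itemsets : List (List Int)), Dom_remove_non_maximal_itemsets frequent_itemsets → Pre_remove_non_maximal_itemsets frequent_itemsets → Spec_remove_non_maximal_itemsets frequent_itemsets (remove_non_maximal_itemsets frequent_itemsets)

-- ===== LEMMAS AND PROOFS =====

-- "s has a proper superset somewhere in fs" (the condition of A's inner loop)
def pvSup (fs : List (List Int)) (s : List Int) : Bool :=
  fs.any (fun y => !pySetEq s y && pySubset s y)

-- sorted2 with keys k1, k2 is sorted with the lexicographic product key
lemma pv_sorted2_eq_sorted_lex {α : Type} (xs : List α) (k1 : α → Int) (k2 : α → List Int) :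
    PySem.List.sorted2 xs k1 k2 false = PySem.List.sorted xs (fun x => toLex (k1 x, k2 x)) false := by
  have hb : (fun (a b : α) => decide (k1 a < k1 b) || (!decide (k1 b < k1 a) && decide (k2 a < k2 b)))
      = fun a b => decide (toLex (k1 a, k2 a) < toLex (k1 b, k2 b)) := by
    funext a b
    rw [Bool.eq_iff_iff]
    simp only [Bool.or_eq_true, Bool.and_eq_true, Bool.not_eq_true', decide_eq_true_eq,
      decide_eq_false_iff_not, Prod.Lex.lt_iff]
    constructor
    · rintro (h | ⟨h1, h2⟩)
      · exact Or.inl h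
      · simp only [ofLex_toLex]
        rcases lt_trichotomy (k1 a) (k1 b) with h | h | h
        · exact Or.inl h
        · exact Or.inr ⟨h, h2⟩
        · exact absurd h h1
    · rintro (h | ⟨h1, h2⟩)
      · exact Or.inl h
      · simp only [ofLex_toLex] at h1 h2
        exact Or.inr ⟨by rw [h1]; exact lt_irrefl _, h2⟩
  simp only [PySem.List.sorted2, PySem.List.sorted, if_neg (by decide : ¬(false = true)), hb]

-- membership form of pySubset
lemma pv_subset_iff (a b : List Int) : pySubset a b = true ↔ ∀ x ∈ a, x ∈ b := by
  simp [pySubset]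

-- a proper subset of a duplicate-free list is strictly shorter
lemma pv_len_lt_of_proper (a b : List Int) (ha : a.Nodup)
    (hs : pySubset a b = true) (hns : pySubset b a = false) : a.length < b.length := by
  rw [pv_subset_iff] at hs
  have hwit : ∃ x ∈ b, x ∉ a := by
    by_contra h
    push Not at h
    have : pySubset b a = true := (pv_subset_iff b a).mpr h
    simp [this] at hns
  obtain ⟨x, hxb, hxa⟩ := hwit
  have hsub : a.toFinset ⊂ b.toFinset := by
    constructor
    · intro y hy
      simp only [List.mem_toFinset] at *
      exact hs y hy
    · intro hba
      exact hxa (List.mem_toFinset.mp (hba (List.mem_toFinset.mpr hxb)))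
  calc a.length = a.toFinset.card := (List.toFinset_card_of_nodup ha).symm
    _ < b.toFinset.card := Finset.card_lt_card hsub
    _ ≤ b.length := b.toFinset_card_le

-- an accumulate-unless loop is a filter
lemma pv_keptA_gen {α : Type} (C : α → Bool) (fs : List α) :
    fs.foldl (fun acc x => if C x then acc else acc ++ [x]) []
    = fs.filter (fun x => !C x) := by
  have : (fun (acc : List α) x => if C x then acc else acc ++ [x])
      = fun acc x => if !C x then acc ++ [x] else acc := by
    funext acc x; cases h : C x <;> simp
  rw [this]
  simpa using PySem.List.foldl_append_if (fun x => !C x) (fun x => x) fs []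

-- a proper superset of s found anywhere in fs is always found in s's suffix of the key-sorted copy
lemma pv_cond_suffix (fs : List (List Int)) (hnd : ∀ l ∈ fs, l.Nodup)
    (pre rest : List (List Int)) (s : List Int)
    (hss : PySem.List.sorted fs (fun x => toLex (pyLen x, pyKey2 x)) false = pre ++ s :: rest) :
    rest.any (fun t => !pySetEq s t && pySubset s t) = pvSup fs s := by
  have hmem : ∀ x, x ∈ pre ++ s :: rest ↔ x ∈ fs := by
    intro x; rw [← hss, PySem.List.mem_sorted]
  rw [Bool.eq_iff_iff]
  simp only [pvSup, List.any_eq_true, Bool.and_eq_true, Bool.not_eq_true']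
  constructor
  · rintro ⟨t, ht, hne, hsub⟩
    exact ⟨t, (hmem t).mp (by simp [ht]), hne, hsub⟩
  · rintro ⟨y, hy, hyne, hysub⟩
    -- y is a proper superset of s, hence strictly longer, hence its key is strictly larger
    have hs_nd : s.Nodup := hnd s ((hmem s).mp (by simp))
    have hys : pySubset y s = false := by
      by_contra h
      have h' : pySubset y s = true := by revert h; cases pySubset y s <;> simp
      have : pySetEq s y = true := by simp [pySetEq, hysub, h']
      rw [this] at hyne; exact absurd hyne (by simp)
    have hlen : s.length < y.length := pv_len_lt_of_proper s y hs_nd hysub hys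
    have hkey : toLex (pyLen s, pyKey2 s) < toLex (pyLen y, pyKey2 y) := by
      rw [Prod.Lex.lt_iff]
      exact Or.inl (by simp only [ofLex_toLex, pyLen]; exact_mod_cast hlen)
    have hpw : (pre ++ s :: rest).Pairwise
        (fun a b => toLex (pyLen a, pyKey2 a) ≤ toLex (pyLen b, pyKey2 b)) := by
      rw [← hss]; exact PySem.List.sorted_pairwise fs _
    have hy' : y ∈ pre ++ s :: rest := (hmem y).mpr hy
    rcases List.mem_append.mp hy' with h | h
    · -- y before s would force key y ≤ key s, contradiction
      have := (List.pairwise_append.mp hpw).2.2 y h s (by simp)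
      exact absurd this (not_le.mpr hkey)
    rcases List.mem_cons.mp h with rfl | h
    · omega
    · exact ⟨y, h, hyne, hysub⟩

-- B's suffix scan over the key-sorted copy is the same filter as A computes
lemma pv_scanB (fs : List (List Int)) (hnd : ∀ l ∈ fs, l.Nodup) :
    ∀ (rest pre : List (List Int)),
    PySem.List.sorted fs (fun x => toLex (pyLen x, pyKey2 x)) false = pre ++ rest →
    altSuffixScan rest = rest.filter (fun x => !pvSup fs x) := by
  intro rest
  induction rest with
  | nil => intro pre _; simp [altSuffixScan]
  | cons s rest' ih =>
    intro pre hss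
    have hcond := pv_cond_suffix fs hnd pre rest' s hss
    have htail := ih (pre ++ [s]) (by rw [hss]; simp)
    simp only [altSuffixScan, hcond, List.filter_cons, htail]
    cases h : pvSup fs s <;> simp

-- stable sorts of two permuted lists agree when key-ties force equality
lemma pv_eq_of_perm_of_pairwise_le_of_tie {α κ : Type} [LinearOrder κ] (key : α → κ) :
    ∀ {l₁ l₂ : List α}, l₁.Perm l₂ →
    l₁.Pairwise (fun a b => key a ≤ key b) → l₂.Pairwise (fun a b => key a ≤ key b) →
    (∀ a ∈ l₁, ∀ b ∈ l₁, key a = key b → a = b) → l₁ = l₂ := by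
  intro l₁
  induction l₁ with
  | nil => intro l₂ hp _ _ _; exact (hp.nil_eq).symm ▸ rfl
  | cons a t ih =>
    intro l₂ hp h1 h2 tie
    cases l₂ with
    | nil => exact absurd hp.symm (by simp)
    | cons b t₂ =>
      have hab : a = b := by
        have hbmem : b ∈ a :: t := hp.symm.subset (List.mem_cons_self ..)
        have hamem : a ∈ b :: t₂ := hp.subset (List.mem_cons_self ..)
        rcases List.mem_cons.mp hbmem with h | hbt
        · exact h.symm
        have h1' : key a ≤ key b := (List.pairwise_cons.mp h1).1 b hbt
        have h2' : key b ≤ key a := by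
          rcases List.mem_cons.mp hamem with h | hat
          · exact h ▸ le_refl _
          · exact (List.pairwise_cons.mp h2).1 a hat
        exact tie a (List.mem_cons_self ..) b (List.mem_cons.mpr (Or.inr hbt)) (le_antisymm h1' h2')
      subst hab
      have hpt : t.Perm t₂ := hp.cons_inv
      have := ih hpt (List.pairwise_cons.mp h1).2 (List.pairwise_cons.mp h2).2
        (fun x hx y hy hk => tie x (List.mem_cons.mpr (Or.inr hx)) y (List.mem_cons.mpr (Or.inr hy)) hk)
      rw [this]

-- equal combined keys mean equal set value, hence (under Pre_) equal encodings
lemma pv_tie (fs : List (List Int))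
    (htie : ∀ a ∈ fs, ∀ b ∈ fs, pySetEq a b = true → a = b)
    (a : List Int) (ha : a ∈ fs) (b : List Int) (hb : b ∈ fs)
    (hk : toLex (pyLen a, pyKey2 a) = toLex (pyLen b, pyKey2 b)) : a = b := by
  have h2 : pyKey2 a = pyKey2 b := congrArg (fun p => (ofLex p).2) hk
  have hmema : ∀ x, x ∈ a ↔ x ∈ pyKey2 a := by
    intro x; rw [pyKey2, PySem.List.mem_sorted]
  have hmemb : ∀ x, x ∈ b ↔ x ∈ pyKey2 b := by
    intro x; rw [pyKey2, PySem.List.mem_sorted]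
  apply htie a ha b hb
  simp only [pySetEq, Bool.and_eq_true]
  constructor
  · exact (pv_subset_iff a b).mpr (fun x hx => (hmemb x).mpr (h2 ▸ (hmema x).mp hx))
  · exact (pv_subset_iff b a).mpr (fun x hx => (hmema x).mpr (h2.symm ▸ (hmemb x).mp hx))

-- ===== VERDICT (by name: the statement is the Claim_ definition above) =====
theorem remove_non_maximal_itemsets_spec : Claim_equal_remove_non_maximal_itemsets := by
  intro fs _ hpre
  obtain ⟨hnd, htie⟩ := hpre
  unfold Spec_remove_non_maximal_itemsets remove_non_maximal_itemsets remove_non_maximal_itemsets_alt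
  have hA : fs.foldl (fun acc itemset =>
      if fs.any (fun other => !pySetEq itemset other && pySubset itemset other)
      then acc else acc ++ [itemset]) []
      = fs.filter (fun x => !pvSup fs x) :=
    pv_keptA_gen (fun itemset => fs.any (fun other => !pySetEq itemset other && pySubset itemset other)) fs
  rw [hA, pv_sorted2_eq_sorted_lex, pv_sorted2_eq_sorted_lex]
  have hB := pv_scanB fs hnd (PySem.List.sorted fs (fun x => toLex (pyLen x, pyKey2 x)) false) [] (by simp)
  rw [hB]
  -- both sides are key-sorted rearrangements of the same filtered multiset; Pre_ kills the ties
  have hperm : (PySem.List.sorted (fs.filter (fun x => !pvSup fs x)) (fun x => toLex (pyLen x, pyKey2 x)) false).Perm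
      ((PySem.List.sorted fs (fun x => toLex (pyLen x, pyKey2 x)) false).filter (fun x => !pvSup fs x)) :=
    (PySem.List.sorted_perm _ _ false).trans
      ((PySem.List.sorted_perm fs _ false).filter (fun x => !pvSup fs x)).symm
  apply pv_eq_of_perm_of_pairwise_le_of_tie (key := fun x => toLex (pyLen x, pyKey2 x)) hperm
  · exact PySem.List.sorted_pairwise _ _
  · exact (PySem.List.sorted_pairwise fs _).filter _
  · intro a hamem b hbmem hk
    have ha : a ∈ fs :=
      (List.mem_filter.mp ((PySem.List.mem_sorted _ _ false a).mp hamem)).1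
    have hb : b ∈ fs :=
      (List.mem_filter.mp ((PySem.List.mem_sorted _ _ false b).mp hbmem)).1
    exact pv_tie fs htie a ha b hb hk
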